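-- pv_equiv track=rewrite | github.com/AJ-Fuhler/PY110 | lesson_3/interview_problems/problem8.py | longest_vowel_substring
-- ===== SOURCE A (Python) =====
-- def longest_vowel_substring(string):
--     vowels = 'aeiou'
--     vowels_in_row = 0
--     row_list = []
--     index = 0
--     while index < len(string):
--         if string[index] in vowels:
--             vowels_in_row += 1
--         else:
--             row_list.append(vowels_in_row)
--             vowels_in_row = 0
--         index += 1
--
--
--     row_list.append(vowels_in_row)
--
--     return max(row_list)
-- ===== SOURCE B (Python) =====
-- from itertools import groupby
--
-- def longest_vowel_substring(string):
--     vowels = 'aeiou'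
--     return max((sum(1 for _ in group)
--                 for is_vowel, group in groupby(string, key=lambda c: c in vowels)
--                 if is_vowel),
--                default=0)
-- ===== Notes on version B (the rewrite author's own statement) =====
-- stated objective: idiomatic
-- what changed: B replaces A's manual index/counter scan that appends every run length (including zeros) into a list with itertools.groupby: it groups the string into maximal vowel/non-vowel runs and takes max of the vowel-group lengths with default=0.
import Mathlib
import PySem

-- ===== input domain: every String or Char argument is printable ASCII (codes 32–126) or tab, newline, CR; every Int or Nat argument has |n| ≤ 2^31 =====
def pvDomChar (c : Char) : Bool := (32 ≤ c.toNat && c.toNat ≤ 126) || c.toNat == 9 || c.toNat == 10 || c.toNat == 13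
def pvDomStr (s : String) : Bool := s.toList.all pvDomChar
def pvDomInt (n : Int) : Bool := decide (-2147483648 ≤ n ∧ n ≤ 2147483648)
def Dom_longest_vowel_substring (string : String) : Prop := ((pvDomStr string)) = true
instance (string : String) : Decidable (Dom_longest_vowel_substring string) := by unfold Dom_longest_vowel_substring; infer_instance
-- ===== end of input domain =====

-- B replaces A's manual index/counter scan (which appends every run length, zeros included,
-- to a list and takes max) with a groupby-style decomposition into maximal runs; idiomatic,
-- same O(n) cost. Return values are proved equal on all of Dom.

-- ===== PORT A =====
-- `string[index] in vowels`
def pvIsVowel (c : Char) : Bool := ("aeiou".toList).contains c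

-- one iteration of A's while loop: state = (vowels_in_row, row_list)
def pvStepA (st : Int × List Int) (c : Char) : Int × List Int :=
  if pvIsVowel c then (st.1 + 1, st.2) else (0, st.2 ++ [st.1])

def longest_vowel_substring (string : String) : Int :=
  let st := string.toList.foldl pvStepA (0, [])
  let row_list := st.2 ++ [st.1]
  -- Python's max on a list; row_list is nonempty (the final append), so the none branch is unreachable
  match PySem.List.max? row_list (fun x => x) with
  | some m => m
  | none => 0

-- ===== PORT B =====
-- itertools.groupby(string, key): maximal runs of equal key, in order, with their key
def pvGroupBy (key : Char → Bool) : List Char → List (Bool × List Char)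
  | [] => []
  | c :: cs =>
    (key c, c :: cs.takeWhile (fun x => key x == key c)) ::
      pvGroupBy key (cs.dropWhile (fun x => key x == key c))
termination_by l => l.length
decreasing_by
  exact Nat.lt_succ_of_le (List.length_dropWhile_le _ _)

def longest_vowel_substring_alt (string : String) : Int :=
  -- the generator: lengths (sum(1 for _ in group)) of the groups whose key is true
  let lens := (pvGroupBy pvIsVowel string.toList).filterMap
      (fun g => if g.1 then some ((g.2.length : Int)) else none)
  -- max(…, default=0)
  match lens with
  | [] => 0
  | x :: t => t.foldl max x

-- ===== PRECONDITION & SPEC =====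
def Spec_longest_vowel_substring (string : String) (out : Int) : Prop := out = longest_vowel_substring_alt string
instance (string : String) (out : Int) : Decidable (Spec_longest_vowel_substring string out) := by unfold Spec_longest_vowel_substring; infer_instance

-- ===== CLAIM (what is proved, stated in full; the proofs are below) =====
def Claim_equal_longest_vowel_substring : Prop := ∀ (string : String), Dom_longest_vowel_substring string → Spec_longest_vowel_substring string (longest_vowel_substring string)

-- ===== LEMMAS AND PROOFS =====

-- the common specification: longest vowel run, given a current open run of length `cur`
def pvG : Int → List Char → Int
  | cur, [] => cur
  | cur, c :: cs => if pvIsVowel c then pvG (cur + 1) cs else max cur (pvG 0 cs)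

theorem pvG_le (l : List Char) : ∀ cur : Int, cur ≤ pvG cur l := by
  induction l with
  | nil => intro cur; simp [pvG]
  | cons c cs ih =>
    intro cur; simp only [pvG]; split
    · exact le_trans (by omega) (ih (cur + 1))
    · exact le_max_left _ _

theorem pvG_nonneg (l : List Char) (cur : Int) (h : 0 ≤ cur) : 0 ≤ pvG cur l :=
  le_trans h (pvG_le l cur)

-- A's loop: max of (row_list ++ [vowels_in_row]) = max (max of acc) (pvG cur l)
theorem foldA_max (l : List Char) : ∀ (cur : Int) (acc : List Int),
    ((l.foldl pvStepA (cur, acc)).2 ++ [(l.foldl pvStepA (cur, acc)).1]).foldl max 0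
      = max (acc.foldl max 0) (pvG cur l) := by
  induction l with
  | nil =>
    intro cur acc
    simp [pvG, List.foldl_append]
  | cons c cs ih =>
    intro cur acc
    simp only [List.foldl_cons, pvStepA, pvG]
    split
    · exact ih (cur + 1) acc
    · rw [ih 0 (acc ++ [cur])]
      simp only [List.foldl_append, List.foldl_cons, List.foldl_nil]
      omega

-- A's loop keeps the counter and every stored run length nonnegative
theorem foldA_nonneg (l : List Char) : ∀ (cur : Int) (acc : List Int), 0 ≤ cur →
    (∀ x ∈ acc, 0 ≤ x) →
    0 ≤ (l.foldl pvStepA (cur, acc)).1 ∧ ∀ x ∈ (l.foldl pvStepA (cur, acc)).2, 0 ≤ x := by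
  induction l with
  | nil => intro cur acc h1 h2; exact ⟨h1, h2⟩
  | cons c cs ih =>
    intro cur acc h1 h2
    simp only [List.foldl_cons, pvStepA]
    split
    · exact ih (cur + 1) acc (by omega) h2
    · refine ih 0 (acc ++ [cur]) le_rfl ?_
      intro x hx
      rcases List.mem_append.mp hx with h | h
      · exact h2 x h
      · simp at h; omega

-- foldl max with a shifted seed
theorem foldl_max_seed (t : List Int) : ∀ a b : Int, t.foldl max (max a b) = max a (t.foldl max b) := by
  induction t with
  | nil => intro a b; rfl
  | cons x xs ih =>
    intro a b
    simp only [List.foldl_cons]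
    rw [max_assoc]
    exact ih a (max b x)

-- foldl max 0 over a cons with nonnegative head
theorem maxD_cons (x : Int) (xs : List Int) (hx : 0 ≤ x) :
    (x :: xs).foldl max 0 = max x (xs.foldl max 0) := by
  simp only [List.foldl_cons]
  rw [show max (0 : Int) x = max x 0 by omega]
  exact foldl_max_seed xs x 0

-- Python's max of a nonempty list of nonnegatives = foldl max 0
theorem head_fold_eq_fold0 (x : Int) (t : List Int) (hx : 0 ≤ x) :
    t.foldl max x = (x :: t).foldl max 0 := by
  simp only [List.foldl_cons]
  congr 1
  omega

-- pvG swallows a nonvowel prefix when the open run is 0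
theorem pvG_nonvowel_prefix (t : List Char) (rest : List Char)
    (h : ∀ x ∈ t, pvIsVowel x = false) : pvG 0 (t ++ rest) = pvG 0 rest := by
  induction t with
  | nil => rfl
  | cons c cs ih =>
    have hc : pvIsVowel c = false := h c (by simp)
    rw [List.cons_append]
    simp only [pvG, hc, Bool.false_eq_true, if_false]
    rw [ih (fun x hx => h x (by simp [hx]))]
    have := pvG_nonneg rest 0 le_rfl
    omega

-- pvG absorbs a vowel prefix into the open run
theorem pvG_vowel_prefix (t : List Char) : ∀ (cur : Int) (rest : List Char),
    (∀ x ∈ t, pvIsVowel x = true) → pvG cur (t ++ rest) = pvG (cur + t.length) rest := by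
  induction t with
  | nil => intro cur rest _; simp
  | cons c cs ih =>
    intro cur rest h
    have hc : pvIsVowel c = true := h c (by simp)
    rw [List.cons_append]
    simp only [pvG, hc, if_true]
    rw [ih (cur + 1) rest (fun x hx => h x (by simp [hx]))]
    congr 1
    simp only [List.length_cons]
    push_cast
    omega

-- pvG with a closed boundary (rest empty or starting nonvowel) splits off the open run
theorem pvG_boundary (k : Int) (hk : 0 ≤ k) (rest : List Char)
    (h : rest = [] ∨ ∃ d ds, rest = d :: ds ∧ pvIsVowel d = false) :
    pvG k rest = max k (pvG 0 rest) := by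
  rcases h with h | ⟨d, ds, h, hd⟩
  · subst h; simp [pvG]; omega
  · subst h
    simp only [pvG, hd, Bool.false_eq_true, if_false]
    have := pvG_nonneg ds 0 le_rfl
    omega

-- shape of dropWhile: empty, or its head falsifies the predicate
theorem dropWhile_shape (p : Char → Bool) (l : List Char) :
    l.dropWhile p = [] ∨ ∃ d ds, l.dropWhile p = d :: ds ∧ p d = false := by
  induction l with
  | nil => exact Or.inl rfl
  | cons c cs ih =>
    by_cases h : p c
    · simpa [h] using ih
    · exact Or.inr ⟨c, cs, by simp [h], by simpa using h⟩

-- B's vowel-group lengths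
def pvLens (l : List Char) : List Int :=
  (pvGroupBy pvIsVowel l).filterMap (fun g => if g.1 then some ((g.2.length : Int)) else none)

theorem pvLens_nonneg (l : List Char) : ∀ x ∈ pvLens l, 0 ≤ x := by
  intro x hx
  rcases List.mem_filterMap.mp hx with ⟨g, _, hg⟩
  split at hg
  · cases hg; positivity
  · cases hg

-- B's max-with-default, as a named function (definitionally the port's match)
def pvMatchMax (xs : List Int) : Int :=
  match xs with
  | [] => 0
  | x :: t => t.foldl max x

-- rewritten as foldl max 0 (all lengths are nonnegative)
theorem matchmax_eq_maxD (xs : List Int) (h : ∀ x ∈ xs, 0 ≤ x) :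
    pvMatchMax xs = xs.foldl max 0 := by
  cases xs with
  | nil => rfl
  | cons x t => exact head_fold_eq_fold0 x t (h x (by simp))

theorem maxD_pvLens_eq_pvG (n : ℕ) : ∀ l : List Char, l.length ≤ n →
    (pvLens l).foldl max 0 = pvG 0 l := by
  induction n with
  | zero =>
    intro l hl
    have : l = [] := List.eq_nil_of_length_eq_zero (Nat.le_zero.mp hl)
    subst this
    simp [pvLens, pvGroupBy]
    rfl
  | succ n ih =>
    intro l hl
    match l with
    | [] => simp [pvLens, pvGroupBy]; rfl
    | c :: cs =>
      have hsplit := List.takeWhile_append_dropWhile (p := fun x => pvIsVowel x == pvIsVowel c) (l := cs)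
      have hrestlen : (cs.dropWhile (fun x => pvIsVowel x == pvIsVowel c)).length ≤ n := by
        have := List.length_dropWhile_le (fun x => pvIsVowel x == pvIsVowel c) cs
        simp only [List.length_cons] at hl
        omega
      have hrest := ih _ hrestlen
      set t := cs.takeWhile (fun x => pvIsVowel x == pvIsVowel c) with ht
      set rest := cs.dropWhile (fun x => pvIsVowel x == pvIsVowel c) with hrestdef
      have htmem : ∀ x ∈ t, pvIsVowel x = pvIsVowel c := by
        intro x hx
        have := List.mem_takeWhile_imp (l := cs) (p := fun x => pvIsVowel x == pvIsVowel c) hx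
        simpa using this
      by_cases hv : pvIsVowel c
      · -- vowel group (c :: t), kept by the filter
        have hshape := dropWhile_shape (fun x => pvIsVowel x == pvIsVowel c) cs
        have hshape' : rest = [] ∨ ∃ d ds, rest = d :: ds ∧ pvIsVowel d = false := by
          rcases hshape with h | ⟨d, ds, h, hd⟩
          · exact Or.inl (by rw [hrestdef]; exact h)
          · exact Or.inr ⟨d, ds, by rw [hrestdef]; exact h, by simpa [hv] using hd⟩
        have hGl : pvG 0 (c :: cs) = max (1 + (t.length : Int)) (pvG 0 rest) := by
          conv_lhs => rw [show c :: cs = c :: (t ++ rest) by rw [hsplit]]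
          simp only [pvG, hv, if_true]
          rw [show (0 : Int) + 1 = 1 by norm_num]
          rw [pvG_vowel_prefix t 1 rest (fun x hx => by rw [htmem x hx]; exact hv)]
          exact pvG_boundary (1 + t.length) (by positivity) rest hshape'
        have hlens : pvLens (c :: cs) = ((c :: t).length : Int) :: pvLens rest := by
          have ht' := ht
          have hr' := hrestdef
          rw [hv] at ht' hr'
          unfold pvLens
          rw [pvGroupBy]
          simp only [hv, List.filterMap_cons, if_true]
          rw [← ht', ← hr']
        rw [hlens, maxD_cons _ _ (by positivity), hrest, hGl]
        simp only [List.length_cons]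
        push_cast
        omega
      · -- nonvowel group, skipped by the filter
        have hvf : pvIsVowel c = false := by simpa using hv
        have hGl : pvG 0 (c :: cs) = pvG 0 rest := by
          conv_lhs => rw [show c :: cs = (c :: t) ++ rest by rw [List.cons_append, hsplit]]
          refine pvG_nonvowel_prefix (c :: t) rest ?_
          intro x hx
          rcases List.mem_cons.mp hx with h | h
          · subst h; exact hvf
          · rw [htmem x h]; exact hvf
        have hlens : pvLens (c :: cs) = pvLens rest := by
          have hr' := hrestdef
          rw [hvf] at hr'
          unfold pvLens
          rw [pvGroupBy]
          simp only [hvf, List.filterMap_cons, Bool.false_eq_true, if_false]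
          rw [← hr']
        rw [hlens, hrest, hGl]

-- ===== VERDICT (by name: the statement is the Claim_ definition above) =====
theorem longest_vowel_substring_spec : Claim_equal_longest_vowel_substring := by
  intro s _
  unfold Spec_longest_vowel_substring
  -- B's side: the port's match is definitionally pvMatchMax over pvLens
  have hB : longest_vowel_substring_alt s = pvMatchMax (pvLens s.toList) := rfl
  rw [hB, matchmax_eq_maxD (pvLens s.toList) (pvLens_nonneg s.toList)]
  rw [maxD_pvLens_eq_pvG s.toList.length s.toList le_rfl]
  -- A's side
  unfold longest_vowel_substring
  simp only
  set st := s.toList.foldl pvStepA ((0 : Int), ([] : List Int)) with hst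
  have hnn := foldA_nonneg s.toList 0 [] le_rfl (by simp)
  rw [← hst] at hnn
  have hmax := foldA_max s.toList 0 []
  rw [← hst] at hmax
  simp only [List.foldl_nil] at hmax
  cases hrow : st.2 ++ [st.1] with
  | nil => simp at hrow
  | cons x xs =>
    rw [PySem.List.max?_id_cons]
    simp only
    have hx0 : 0 ≤ x := by
      have hxmem : x ∈ st.2 ++ [st.1] := by rw [hrow]; simp
      rcases List.mem_append.mp hxmem with h | h
      · exact hnn.2 x h
      · simp at h; omega
    rw [head_fold_eq_fold0 x xs hx0, ← hrow, hmax]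
    have := pvG_nonneg s.toList 0 le_rfl
    simp
    omega
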